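-- pv_equiv track=rewrite | github.com/pekoto/python-data-structures | problems/dynamic_fibonacci.py | _minimum_jumps_with_fee
-- ===== SOURCE A (Python) =====
-- import math
--
-- def _minimum_jumps_with_fee(stairs: list[int], index: int) -> int:
--     """Recursive helper function."""
--
--     # In this problem, the aim is to beyond the top of the staircase
--     if index >= len(stairs):
--         return 0
--
--     # If we had to reach the top element, we could check if we overran and return
--     # math.inf, for example, and then check the result before taking min.
--
--     minimum_fee = math.inf
--
--     for i in range(1, 4):
--         result = _minimum_jumps_with_fee(stairs, index+i)
--         minimum_fee = min(stairs[index] + result, minimum_fee)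
--
--     return minimum_fee
-- ===== SOURCE B (Python) =====
-- def _minimum_jumps_with_fee(stairs: list[int], index: int) -> int:
--     """Bottom-up DP: O(n) time, O(1) extra space instead of O(3^n) recursion."""
--     n = len(stairs)
--     if index >= n:
--         return 0
--     d0 = d1 = d2 = 0  # fees from index j+1, j+2, j+3 past the top
--     j = n - 1
--     while j >= index:
--         d0, d1, d2 = stairs[j] + min(d0, d1, d2), d0, d1
--         j -= 1
--     return d0
-- ===== Notes on version B (the rewrite author's own statement) =====
-- stated objective: faster
-- what changed: Replaced the exponential triple recursion with a bottom-up DP loop from the top stair down to index keeping only the last three subproblem values; intended as faster (asymptotic): in a timing run A timed out at n=64 where B returned, though a timing run could not confirm a ratio at the largest size both finished.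
import Mathlib
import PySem

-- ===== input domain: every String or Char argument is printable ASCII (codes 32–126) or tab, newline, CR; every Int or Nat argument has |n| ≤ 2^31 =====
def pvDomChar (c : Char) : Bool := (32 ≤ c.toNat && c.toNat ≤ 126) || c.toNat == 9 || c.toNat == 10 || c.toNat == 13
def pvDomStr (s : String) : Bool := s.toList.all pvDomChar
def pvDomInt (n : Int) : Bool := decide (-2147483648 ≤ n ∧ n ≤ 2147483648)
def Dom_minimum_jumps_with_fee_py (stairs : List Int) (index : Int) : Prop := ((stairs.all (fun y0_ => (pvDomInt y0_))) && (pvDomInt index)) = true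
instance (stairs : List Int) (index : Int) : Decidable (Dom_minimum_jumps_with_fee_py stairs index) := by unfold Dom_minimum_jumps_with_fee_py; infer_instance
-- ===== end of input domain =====

-- B replaces A's triple recursion by a bottom-up DP keeping the last three values (intended as faster; in a timing run A timed out at n=64 where B returned).

-- ===== PORT A =====
-- Literal port of the recursive A: the i = 1,2,3 loop over `min` is unrolled;
-- stairs[index] (Python negative-index semantics) is PySem.List.pyGet?, with
-- .getD 0 where Python would raise IndexError (excluded by Pre_).
def minimum_jumps_with_fee_py (stairs : List Int) (index : Int) : Int :=
  if _h : index ≥ (stairs.length : Int) then 0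
  else
    let g := (PySem.List.pyGet? stairs index).getD 0
    let r1 := minimum_jumps_with_fee_py stairs (index + 1)
    let r2 := minimum_jumps_with_fee_py stairs (index + 2)
    let r3 := minimum_jumps_with_fee_py stairs (index + 3)
    -- minimum_fee after i=1: g+r1; after i=2: min(g+r2, g+r1); after i=3: min(g+r3, ...)
    min (g + r3) (min (g + r2) (g + r1))
termination_by ((stairs.length : Int) - index).toNat
decreasing_by all_goals omega

-- ===== PORT B =====
-- The while loop of Source B: state (d0, d1, d2), j counts down from n-1 to index.
def minJumpsLoop (stairs : List Int) (index : Int) (j : Int) (d : Int × Int × Int) : Int × Int × Int :=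
  if _h : j ≥ index then
    minJumpsLoop stairs index (j - 1)
      ((PySem.List.pyGet? stairs j).getD 0 + min d.1 (min d.2.1 d.2.2), d.1, d.2.1)
  else d
termination_by (j - index + 1).toNat
decreasing_by omega

def minimum_jumps_with_fee_py_alt (stairs : List Int) (index : Int) : Int :=
  if index ≥ (stairs.length : Int) then 0
  else (minJumpsLoop stairs index ((stairs.length : Int) - 1) (0, 0, 0)).1

-- ===== PRECONDITION & SPEC =====
-- Pre_ excludes index < -len(stairs), where Python A raises IndexError on stairs[index].
def Pre_minimum_jumps_with_fee_py (stairs : List Int) (index : Int) : Prop :=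
  -(stairs.length : Int) ≤ index
instance (stairs : List Int) (index : Int) : Decidable (Pre_minimum_jumps_with_fee_py stairs index) := by unfold Pre_minimum_jumps_with_fee_py; infer_instance

def pvWitness_minimum_jumps_with_fee_py : List Int × Int := ([10, 5, 3, 7], 0)

def Spec_minimum_jumps_with_fee_py (stairs : List Int) (index : Int) (out : Int) : Prop := out = minimum_jumps_with_fee_py_alt stairs index
instance (stairs : List Int) (index : Int) (out : Int) : Decidable (Spec_minimum_jumps_with_fee_py stairs index out) := by unfold Spec_minimum_jumps_with_fee_py; infer_instance

-- ===== CLAIM (what is proved, stated in full; the proofs are below) =====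
def Claim_equal_minimum_jumps_with_fee_py : Prop := ∀ (stairs : List Int) (index : Int), Dom_minimum_jumps_with_fee_py stairs index → Pre_minimum_jumps_with_fee_py stairs index → Spec_minimum_jumps_with_fee_py stairs index (minimum_jumps_with_fee_py stairs index)

-- ===== LEMMAS AND PROOFS =====

-- A's recursion at or past the top of the staircase.
theorem fA_ge (stairs : List Int) (j : Int) (h : j ≥ (stairs.length : Int)) :
    minimum_jumps_with_fee_py stairs j = 0 := by
  rw [minimum_jumps_with_fee_py]; simp [h]

-- A's recursion below the top, rearranged to B's `g + min` shape.
theorem fA_lt (stairs : List Int) (j : Int) (h : ¬ j ≥ (stairs.length : Int)) :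
    minimum_jumps_with_fee_py stairs j =
      (PySem.List.pyGet? stairs j).getD 0 +
        min (minimum_jumps_with_fee_py stairs (j + 1))
          (min (minimum_jumps_with_fee_py stairs (j + 2))
               (minimum_jumps_with_fee_py stairs (j + 3))) := by
  rw [minimum_jumps_with_fee_py]; simp only [h, dite_false]
  omega

-- Loop invariant: started at j < n with the three A-values above j, the loop
-- returns the three A-values at index.
theorem loop_inv (stairs : List Int) (index : Int) (k : Nat) :
    ∀ (j : Int), j < (stairs.length : Int) → index - 1 ≤ j → (j - index + 1).toNat = k →
      minJumpsLoop stairs index j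
          (minimum_jumps_with_fee_py stairs (j + 1),
           minimum_jumps_with_fee_py stairs (j + 2),
           minimum_jumps_with_fee_py stairs (j + 3)) =
        (minimum_jumps_with_fee_py stairs index,
         minimum_jumps_with_fee_py stairs (index + 1),
         minimum_jumps_with_fee_py stairs (index + 2)) := by
  induction k with
  | zero =>
    intro j hj hj2 hk
    have hlt : ¬ j ≥ index := by omega
    rw [minJumpsLoop]; simp only [hlt, dite_false]
    have hje : j = index - 1 := by omega
    subst hje
    have e1 : index - 1 + 1 = index := by omega
    have e2 : index - 1 + 2 = index + 1 := by omega
    have e3 : index - 1 + 3 = index + 2 := by omega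
    rw [e1, e2, e3]
  | succ k ih =>
    intro j hj hj2 hk
    have hge : j ≥ index := by omega
    rw [minJumpsLoop]; simp only [hge, dite_true]
    have hstep : (PySem.List.pyGet? stairs j).getD 0 +
        min (minimum_jumps_with_fee_py stairs (j + 1))
          (min (minimum_jumps_with_fee_py stairs (j + 2))
               (minimum_jumps_with_fee_py stairs (j + 3)))
        = minimum_jumps_with_fee_py stairs j := (fA_lt stairs j (by omega)).symm
    simp only [hstep]
    have h1 : j - 1 + 1 = j := by omega
    have h2 : j - 1 + 2 = j + 1 := by omega
    have h3 : j - 1 + 3 = j + 2 := by omega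
    have := ih (j - 1) (by omega) (by omega) (by omega)
    rw [h1, h2, h3] at this
    exact this

-- ===== VERDICT (by name: the statement is the Claim_ definition above) =====
theorem minimum_jumps_with_fee_py_spec : Claim_equal_minimum_jumps_with_fee_py := by
  intro stairs index _ _
  unfold Spec_minimum_jumps_with_fee_py minimum_jumps_with_fee_py_alt
  by_cases h : index ≥ (stairs.length : Int)
  · simp only [h, if_true]
    exact fA_ge stairs index h
  · simp only [h, if_false]
    have hz1 := fA_ge stairs ((stairs.length : Int) - 1 + 1) (by omega)
    have hz2 := fA_ge stairs ((stairs.length : Int) - 1 + 2) (by omega)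
    have hz3 := fA_ge stairs ((stairs.length : Int) - 1 + 3) (by omega)
    have := loop_inv stairs index (((stairs.length : Int) - 1) - index + 1).toNat
      ((stairs.length : Int) - 1) (by omega) (by omega) rfl
    rw [hz1, hz2, hz3] at this
    rw [this]
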